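-- pv_equiv track=rewrite | github.com/AE-nv/aedvent-code-2022 | day 15/Xavier - Python/day.py | find_distress_beacon
-- ===== SOURCE A (Python) =====
-- from typing import Generator, Optional
--
-- def manhattan_distance(p1: tuple[int, int], p2: tuple[int, int]) -> int:
--     return abs(p1[0]-p2[0]) + abs(p1[1]-p2[1])
--
-- def generate_points_at_distance(sensor: tuple[int, int], distance: int) -> Generator[tuple[int, int], None, None]:
--     sx, sy = sensor
--     for x in range(0, distance+1):
--         y = distance-x
--         yield (sx+x,sy+y)
--         yield (sx-x,sy-y)
--         if not y == 0 and not x == 0: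
--             yield (sx+-x,sy+y)
--             yield (sx+x,sy-y)
--
-- def undetectable(p: tuple[int, int], sensors: list[tuple[int, int]], beacons: list[tuple[int, int]]) -> bool:
--     for i in range(len(sensors)):
--         if manhattan_distance(p, sensors[i]) <= manhattan_distance(sensors[i], beacons[i]):
--             return False
--     return True
--
-- def find_distress_beacon(sensors: list[tuple[int, int]], beacons: list[tuple[int, int]], min: int, max: int) -> Optional[tuple[int, int]]:
--     for i in range(len(sensors)):
--         sensor, beacon = sensors[i], beacons[i]
--         distance = manhattan_distance(sensor, beacon)+1
--         for p in generate_points_at_distance(sensor, distance):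
--             if min<=p[0]<=max and min<=p[1]<=max and undetectable(p, sensors, beacons):
--                 return p
--     return None
-- ===== SOURCE B (Python) =====
-- def seg_point(sx, sy, d, k, x):
--     # segment k of the radius-d diamond boundary around (sx, sy), parameterised by x in [0, d]
--     if k == 0:
--         return (sx + x, sy + (d - x))
--     if k == 1:
--         return (sx - x, sy - (d - x))
--     if k == 2:
--         return (sx - x, sy + (d - x))
--     return (sx + x, sy - (d - x))
--
--
-- def seg_domain(sx, sy, d, lo_box, hi_box, k):
--     # the x-offsets of segment k whose point lies inside the box [lo_box, hi_box]^2
--     if k == 0: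
--         return (max(0, lo_box - sx, sy + d - hi_box), min(d, hi_box - sx, sy + d - lo_box))
--     if k == 1:
--         return (max(0, sx - hi_box, lo_box - sy + d), min(d, sx - lo_box, hi_box - sy + d))
--     if k == 2:
--         return (max(1, sx - hi_box, sy + d - hi_box), min(d - 1, sx - lo_box, sy + d - lo_box))
--     return (max(1, lo_box - sx, lo_box - sy + d), min(d - 1, hi_box - sx, hi_box - sy + d))
--
--
-- def covered_interval(sr, sx, sy, d, k):
--     # x-offsets of segment k whose point is within range of sensor sr = ((cx, cy), r):
--     # |px-cx|+|py-cy| <= r becomes |x-p| + |x-q| <= r, whose solution set is an interval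
--     (cx, cy), r = sr
--     p = cx - sx if k in (0, 3) else sx - cx
--     q = sy + d - cy if k in (0, 2) else cy - sy + d
--     lo, hi = (p, q) if p <= q else (q, p)
--     s = r - (hi - lo)
--     if s < 0:
--         return None
--     return (lo - s // 2, hi + s // 2)
--
--
-- def seg_min(info, sx, sy, d, lo_box, hi_box, k):
--     # smallest in-box x-offset on segment k not covered by any sensor, or None
--     L, H = seg_domain(sx, sy, d, lo_box, hi_box, k)
--     if L > H:
--         return None
--     ivs = [iv for iv in (covered_interval(sr, sx, sy, d, k) for sr in info) if iv is not None]
--     ivs = sorted(ivs, key=lambda iv: iv[0])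
--     x = L
--     for lo, hi in ivs:
--         if lo > x:
--             break
--         if hi >= x:
--             x = hi + 1
--     return x if x <= H else None
--
--
-- def find_distress_beacon(sensors, beacons, min, max):
--     info = [((sx, sy), abs(sx - bx) + abs(sy - by))
--             for (sx, sy), (bx, by) in zip(sensors, beacons)]
--     for (sx, sy), r in info:
--         d = r + 1
--         best = None  # lexicographically minimal (x-offset, segment)
--         for k in range(4):
--             m = seg_min(info, sx, sy, d, min, max, k)
--             if m is not None and (best is None or m < best[0]):
--                 best = (m, k)
--         if best is not None:
--             return seg_point(sx, sy, d, best[1], best[0])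
--     return None
-- ===== Notes on version B (the rewrite author's own statement) =====
-- stated objective: faster
-- what changed: B never enumerates boundary points: per sensor and per boundary segment it computes each sensor's coverage as a closed-form x-offset interval, sorts the intervals and sweeps for the first gap, then returns the lexicographically minimal (offset, segment) candidate, which is exactly A's first hit; A walks every point of every enlarged diamond boundary and tests each against all sensors.
import Mathlib
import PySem

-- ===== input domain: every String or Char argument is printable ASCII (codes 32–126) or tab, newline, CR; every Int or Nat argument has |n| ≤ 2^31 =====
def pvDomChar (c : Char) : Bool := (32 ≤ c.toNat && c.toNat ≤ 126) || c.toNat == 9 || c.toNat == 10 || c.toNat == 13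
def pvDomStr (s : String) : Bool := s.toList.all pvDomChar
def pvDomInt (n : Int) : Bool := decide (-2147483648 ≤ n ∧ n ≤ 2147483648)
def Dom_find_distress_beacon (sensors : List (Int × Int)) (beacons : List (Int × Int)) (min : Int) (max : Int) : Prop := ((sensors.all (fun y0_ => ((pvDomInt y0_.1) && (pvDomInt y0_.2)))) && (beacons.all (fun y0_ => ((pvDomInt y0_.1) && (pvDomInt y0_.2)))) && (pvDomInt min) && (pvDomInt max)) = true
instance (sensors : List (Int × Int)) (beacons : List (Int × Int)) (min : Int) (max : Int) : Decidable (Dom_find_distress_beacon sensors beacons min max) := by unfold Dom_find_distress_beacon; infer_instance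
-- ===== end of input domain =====

-- B replaces A's point-by-point walk of each enlarged diamond boundary by closed-form interval
-- arithmetic: per sensor and boundary segment it computes every sensor's coverage as one x-offset
-- interval, sorts the intervals and sweeps for the first gap, then returns the lexicographically
-- least (offset, segment) candidate — A's first hit (objective: faster; the radius no longer
-- appears in the running time). Equivalence is about the return value; nothing is mutated.

-- ===== PORT A =====
def pvManhattan (p1 p2 : Int × Int) : Int := |p1.1 - p2.1| + |p1.2 - p2.2|

def pvGenPoints (sensor : Int × Int) (distance : Int) : List (Int × Int) :=
  (PySem.List.pyRange 0 (distance + 1) 1).flatMap (fun x =>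
    let y := distance - x
    [(sensor.1 + x, sensor.2 + y), (sensor.1 - x, sensor.2 - y)] ++
      (if ¬ y = 0 ∧ ¬ x = 0 then [(sensor.1 - x, sensor.2 + y), (sensor.1 + x, sensor.2 - y)] else []))

def pvUndetectableGo (p : Int × Int) (sensors beacons : List (Int × Int)) : List Int → Bool
  | [] => true
  | i :: is =>
    -- pyGet? … |>.getD (0,0): A indexes sensors[i]/beacons[i]; under Pre_ the index is in range
    let s := (PySem.List.pyGet? sensors i).getD (0, 0)
    let b := (PySem.List.pyGet? beacons i).getD (0, 0)
    if pvManhattan p s ≤ pvManhattan s b then false else pvUndetectableGo p sensors beacons is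

def pvUndetectable (p : Int × Int) (sensors beacons : List (Int × Int)) : Bool :=
  pvUndetectableGo p sensors beacons (PySem.List.pyRange 0 (sensors.length : Int) 1)

def pvFdbGo (sensors beacons : List (Int × Int)) (mn mx : Int) : List Int → Option (Int × Int)
  | [] => none
  | i :: is =>
    let sensor := (PySem.List.pyGet? sensors i).getD (0, 0)
    let beacon := (PySem.List.pyGet? beacons i).getD (0, 0)
    let distance := pvManhattan sensor beacon + 1
    match (pvGenPoints sensor distance).findSome? (fun p =>
        if mn ≤ p.1 ∧ p.1 ≤ mx ∧ mn ≤ p.2 ∧ p.2 ≤ mx ∧ pvUndetectable p sensors beacons then some p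
        else none) with
    | some p => some p
    | none => pvFdbGo sensors beacons mn mx is

def find_distress_beacon (sensors : List (Int × Int)) (beacons : List (Int × Int)) (min : Int) (max : Int) : Option (Int × Int) :=
  pvFdbGo sensors beacons min max (PySem.List.pyRange 0 (sensors.length : Int) 1)

-- ===== PORT B =====
def pvInfo (sensors beacons : List (Int × Int)) : List ((Int × Int) × Int) :=
  (sensors.zip beacons).map (fun sb => (sb.1, |sb.1.1 - sb.2.1| + |sb.1.2 - sb.2.2|))

-- seg_point: segment k of the radius-d diamond boundary, parameterised by the x-offset
def pvSegPoint (sx sy d k x : Int) : Int × Int :=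
  if k = 0 then (sx + x, sy + (d - x))
  else if k = 1 then (sx - x, sy - (d - x))
  else if k = 2 then (sx - x, sy + (d - x))
  else (sx + x, sy - (d - x))

-- seg_domain: the x-offsets of segment k whose point lies inside the box
def pvSegDom (sx sy d mn mx k : Int) : Int × Int :=
  if k = 0 then (max 0 (max (mn - sx) (sy + d - mx)), min d (min (mx - sx) (sy + d - mn)))
  else if k = 1 then (max 0 (max (sx - mx) (mn - sy + d)), min d (min (sx - mn) (mx - sy + d)))
  else if k = 2 then (max 1 (max (sx - mx) (sy + d - mx)), min (d - 1) (min (sx - mn) (sy + d - mn)))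
  else (max 1 (max (mn - sx) (mn - sy + d)), min (d - 1) (min (mx - sx) (mx - sy + d)))

-- covered_interval, closed form of {x : |x-p| + |x-q| ≤ r} (an interval, or None)
def pvIv (p q r : Int) : Option (Int × Int) :=
  let lo := min p q
  let hi := max p q
  let s := r - (hi - lo)
  if s < 0 then none else some (lo - PySem.Int.floordiv s 2, hi + PySem.Int.floordiv s 2)

def pvSegIv (sx sy d k : Int) (sr : (Int × Int) × Int) : Option (Int × Int) :=
  pvIv (if k = 0 ∨ k = 3 then sr.1.1 - sx else sx - sr.1.1)
       (if k = 0 ∨ k = 2 then sy + d - sr.1.2 else sr.1.2 - sy + d) sr.2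

-- the for-loop with break of seg_min: first gap at or after x in the lo-sorted intervals
def pvSweep : Int → List (Int × Int) → Int
  | x, [] => x
  | x, iv :: t => if iv.1 > x then x else if iv.2 ≥ x then pvSweep (iv.2 + 1) t else pvSweep x t

def pvSegMin (info : List ((Int × Int) × Int)) (sx sy d mn mx k : Int) : Option Int :=
  let LH := pvSegDom sx sy d mn mx k
  if LH.1 > LH.2 then none
  else
    let ivs := PySem.List.sorted (info.filterMap (pvSegIv sx sy d k)) (fun iv => iv.1) false
    let m := pvSweep LH.1 ivs
    if m ≤ LH.2 then some m else none

-- body of 'for k in range(4)': keep the lexicographically least (offset, segment)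
def pvSegStep (info : List ((Int × Int) × Int)) (sx sy d mn mx : Int)
    (best : Option (Int × Int)) (k : Int) : Option (Int × Int) :=
  match pvSegMin info sx sy d mn mx k, best with
  | none, _ => best
  | some m, none => some (m, k)
  | some m, some b => if m < b.1 then some (m, k) else some b

def pvSensorScan (info : List ((Int × Int) × Int)) (mn mx : Int) (sr : (Int × Int) × Int) : Option (Int × Int) :=
  match (PySem.List.pyRange 0 4 1).foldl (pvSegStep info sr.1.1 sr.1.2 (sr.2 + 1) mn mx) none with
  | none => none
  | some b => some (pvSegPoint sr.1.1 sr.1.2 (sr.2 + 1) b.2 b.1)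

def find_distress_beacon_alt (sensors : List (Int × Int)) (beacons : List (Int × Int)) (min : Int) (max : Int) : Option (Int × Int) :=
  (pvInfo sensors beacons).findSome? (pvSensorScan (pvInfo sensors beacons) min max)

-- ===== PRECONDITION & SPEC =====
-- Pre_ excludes only inputs where A raises IndexError: with fewer beacons than sensors (and at
-- least one sensor) A always hits beacons[i] with i out of range before it can return.
def Pre_find_distress_beacon (sensors : List (Int × Int)) (beacons : List (Int × Int)) (min : Int) (max : Int) : Prop :=
  sensors.length ≤ beacons.length
instance (sensors : List (Int × Int)) (beacons : List (Int × Int)) (min : Int) (max : Int) : Decidable (Pre_find_distress_beacon sensors beacons min max) := by unfold Pre_find_distress_beacon; infer_instance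

def pvWitness_find_distress_beacon : (List (Int × Int)) × (List (Int × Int)) × Int × Int :=
  ([(0, 0)], [(1, 0)], 0, 3)

def Spec_find_distress_beacon (sensors : List (Int × Int)) (beacons : List (Int × Int)) (min : Int) (max : Int) (out : Option (Int × Int)) : Prop := out = find_distress_beacon_alt sensors beacons min max
instance (sensors : List (Int × Int)) (beacons : List (Int × Int)) (min : Int) (max : Int) (out : Option (Int × Int)) : Decidable (Spec_find_distress_beacon sensors beacons min max out) := by unfold Spec_find_distress_beacon; infer_instance

-- ===== CLAIM (what is proved, stated in full; the proofs are below) =====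
def Claim_equal_find_distress_beacon : Prop := ∀ (sensors : List (Int × Int)) (beacons : List (Int × Int)) (min : Int) (max : Int), Dom_find_distress_beacon sensors beacons min max → Pre_find_distress_beacon sensors beacons min max → Spec_find_distress_beacon sensors beacons min max (find_distress_beacon sensors beacons min max)

-- ===== LEMMAS AND PROOFS =====

-- proof-side abbreviation: the point is outside every sensor's exclusion radius
def pvAltFree (info : List ((Int × Int) × Int)) (px py : Int) : Bool :=
  info.all (fun sr => |px - sr.1.1| + |py - sr.1.2| > sr.2)

-- proof-side: x is an admissible (in-window) uncovered offset of segment k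
def pvOk (info : List ((Int × Int) × Int)) (sx sy d mn mx k x : Int) : Prop :=
  (pvSegDom sx sy d mn mx k).1 ≤ x ∧ x ≤ (pvSegDom sx sy d mn mx k).2 ∧
    pvAltFree info (pvSegPoint sx sy d k x).1 (pvSegPoint sx sy d k x).2 = true

-- findSome? distributes over flatMap
theorem pv_findSome?_flatMap {α β γ : Type} (l : List α) (f : α → List β) (g : β → Option γ) :
    (l.flatMap f).findSome? g = l.findSome? (fun x => (f x).findSome? g) := by
  induction l with
  | nil => rfl
  | cons a t ih =>
    simp only [List.flatMap_cons, List.findSome?_append, List.findSome?_cons]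
    cases (f a).findSome? g with
    | none => simpa using ih
    | some v => simp

-- A's undetectable scan equals an all-scan of the zipped list
theorem pv_und_go (p : Int × Int) (s b : List (Int × Int)) (hlen : s.length ≤ b.length) :
    ∀ (m : Nat) (a : Int), 0 ≤ a → ((s.length : Int) - a).toNat = m →
      pvUndetectableGo p s b (PySem.List.pyRange a (s.length : Int) 1) =
        ((s.zip b).drop a.toNat).all
          (fun sb => ! decide (pvManhattan p sb.1 ≤ pvManhattan sb.1 sb.2)) := by
  intro m
  induction m with
  | zero =>
    intro a ha h0
    rw [PySem.List.pyRange_one_eq_nil (by omega)]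
    have hnil : (s.zip b).drop a.toNat = [] := by
      apply List.drop_eq_nil_of_le
      simp only [List.length_zip]
      omega
    simp [pvUndetectableGo, hnil]
  | succ m ih =>
    intro a ha h0
    have hlt : a < (s.length : Int) := by omega
    have hk : a.toNat < s.length := by omega
    have hkb : a.toNat < b.length := by omega
    have hzl : a.toNat < (s.zip b).length := by simp only [List.length_zip]; omega
    rw [PySem.List.pyRange_one_cons hlt]
    have hs : PySem.List.pyGet? s a = some s[a.toNat] :=
      PySem.List.pyGet?_eq_some_getElem s ha (by exact_mod_cast hlt)
    have hbg : PySem.List.pyGet? b a = some b[a.toNat] :=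
      PySem.List.pyGet?_eq_some_getElem b ha (by omega)
    have hget : (s.zip b)[a.toNat]? = some (s[a.toNat], b[a.toNat]) := by
      rw [List.getElem?_zip_eq_some]
      exact ⟨List.getElem?_eq_getElem hk, List.getElem?_eq_getElem hkb⟩
    have hdrop : (s.zip b).drop a.toNat =
        (s[a.toNat], b[a.toNat]) :: (s.zip b).drop (a.toNat + 1) := by
      rw [List.drop_eq_getElem_cons hzl]
      congr 1
      rw [← Option.some_inj, ← List.getElem?_eq_getElem hzl]
      exact hget
    have hstep := ih (a + 1) (by omega) (by omega)
    have htn : (a + 1).toNat = a.toNat + 1 := by omega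
    rw [htn] at hstep
    by_cases hle : pvManhattan p s[a.toNat] ≤ pvManhattan s[a.toNat] b[a.toNat]
    · simp [pvUndetectableGo, hs, hbg, hle, hdrop]
    · simp [pvUndetectableGo, hs, hbg, hle, hdrop, hstep]

theorem pv_und_eq_free (p : Int × Int) (s b : List (Int × Int)) (hlen : s.length ≤ b.length) :
    pvUndetectable p s b = pvAltFree (pvInfo s b) p.1 p.2 := by
  unfold pvUndetectable pvAltFree pvInfo
  rw [pv_und_go p s b hlen ((s.length : Int) - 0).toNat 0 le_rfl rfl]
  simp only [Int.toNat_zero, List.drop_zero, List.all_map]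
  refine List.all_congr rfl fun sb => ?_
  simp only [Function.comp_apply, pvManhattan, ← decide_not, not_le]

-- the closed-form interval of pvIv is exactly the solution set of |x-p| + |x-q| ≤ r
theorem pv_iv_core (p q r x : Int) :
    (∃ iv : Int × Int, pvIv p q r = some iv ∧ iv.1 ≤ x ∧ x ≤ iv.2) ↔ |x - p| + |x - q| ≤ r := by
  unfold pvIv
  have h2 : PySem.Int.floordiv (r - (max p q - min p q)) 2 = (r - (max p q - min p q)) / 2 :=
    PySem.Int.floordiv_eq_ediv_of_pos (by norm_num)
  dsimp only
  rw [h2]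
  by_cases hs : r - (max p q - min p q) < 0
  · simp only [hs, if_true]
    simp only [Int.abs_eq_natAbs]
    constructor
    · rintro ⟨iv, h, -⟩; cases h
    · intro h; exfalso; omega
  · simp only [hs, if_false]
    simp only [Int.abs_eq_natAbs]
    constructor
    · rintro ⟨iv, hiv, h1, h2'⟩
      cases hiv; dsimp at h1 h2'; omega
    · intro h; exact ⟨_, rfl, by dsimp; omega, by dsimp; omega⟩

-- per-segment pointwise bridge: covered-interval membership = within sensor range
theorem pv_iv_bridge (sx sy d x : Int) (k : Int) (hk : k = 0 ∨ k = 1 ∨ k = 2 ∨ k = 3)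
    (sr : (Int × Int) × Int) :
    (∃ iv, pvSegIv sx sy d k sr = some iv ∧ iv.1 ≤ x ∧ x ≤ iv.2) ↔
      |(pvSegPoint sx sy d k x).1 - sr.1.1| + |(pvSegPoint sx sy d k x).2 - sr.1.2| ≤ sr.2 := by
  rcases hk with rfl | rfl | rfl | rfl
  · rw [show pvSegIv sx sy d 0 sr = pvIv (sr.1.1 - sx) (sy + d - sr.1.2) sr.2 by
        unfold pvSegIv; rw [if_pos (by norm_num), if_pos (by norm_num)]]
    rw [show pvSegPoint sx sy d 0 x = (sx + x, sy + (d - x)) by unfold pvSegPoint; rw [if_pos rfl]]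
    rw [show (sx + x, sy + (d - x)).1 - sr.1.1 = x - (sr.1.1 - sx) by dsimp; ring,
        show (sx + x, sy + (d - x)).2 - sr.1.2 = -(x - (sy + d - sr.1.2)) by dsimp; ring, abs_neg]
    exact pv_iv_core (sr.1.1 - sx) (sy + d - sr.1.2) sr.2 x
  · rw [show pvSegIv sx sy d 1 sr = pvIv (sx - sr.1.1) (sr.1.2 - sy + d) sr.2 by
        unfold pvSegIv; rw [if_neg (by norm_num), if_neg (by norm_num)]]
    rw [show pvSegPoint sx sy d 1 x = (sx - x, sy - (d - x)) by
        unfold pvSegPoint; rw [if_neg (by norm_num), if_pos rfl]]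
    rw [show (sx - x, sy - (d - x)).1 - sr.1.1 = -(x - (sx - sr.1.1)) by dsimp; ring, abs_neg,
        show (sx - x, sy - (d - x)).2 - sr.1.2 = x - (sr.1.2 - sy + d) by dsimp; ring]
    exact pv_iv_core (sx - sr.1.1) (sr.1.2 - sy + d) sr.2 x
  · rw [show pvSegIv sx sy d 2 sr = pvIv (sx - sr.1.1) (sy + d - sr.1.2) sr.2 by
        unfold pvSegIv; rw [if_neg (by norm_num), if_pos (by norm_num)]]
    rw [show pvSegPoint sx sy d 2 x = (sx - x, sy + (d - x)) by
        unfold pvSegPoint; rw [if_neg (by norm_num), if_neg (by norm_num), if_pos rfl]]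
    rw [show (sx - x, sy + (d - x)).1 - sr.1.1 = -(x - (sx - sr.1.1)) by dsimp; ring, abs_neg,
        show (sx - x, sy + (d - x)).2 - sr.1.2 = -(x - (sy + d - sr.1.2)) by dsimp; ring, abs_neg]
    exact pv_iv_core (sx - sr.1.1) (sy + d - sr.1.2) sr.2 x
  · rw [show pvSegIv sx sy d 3 sr = pvIv (sr.1.1 - sx) (sr.1.2 - sy + d) sr.2 by
        unfold pvSegIv; rw [if_pos (by norm_num), if_neg (by norm_num)]]
    rw [show pvSegPoint sx sy d 3 x = (sx + x, sy - (d - x)) by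
        unfold pvSegPoint; rw [if_neg (by norm_num), if_neg (by norm_num), if_neg (by norm_num)]]
    rw [show (sx + x, sy - (d - x)).1 - sr.1.1 = x - (sr.1.1 - sx) by dsimp; ring,
        show (sx + x, sy - (d - x)).2 - sr.1.2 = x - (sr.1.2 - sy + d) by dsimp; ring]
    exact pv_iv_core (sr.1.1 - sx) (sr.1.2 - sy + d) sr.2 x

-- free at the segment point = no covered interval contains x
theorem pv_free_bridge (info : List ((Int × Int) × Int)) (sx sy d x : Int) (k : Int)
    (hk : k = 0 ∨ k = 1 ∨ k = 2 ∨ k = 3) :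
    pvAltFree info (pvSegPoint sx sy d k x).1 (pvSegPoint sx sy d k x).2 = true ↔
      ∀ iv ∈ info.filterMap (pvSegIv sx sy d k), ¬ (iv.1 ≤ x ∧ x ≤ iv.2) := by
  unfold pvAltFree
  rw [List.all_eq_true]
  constructor
  · intro h iv hiv hmem
    obtain ⟨sr, hsr, hf⟩ := List.mem_filterMap.mp hiv
    have hfree := h sr hsr
    have hle := (pv_iv_bridge sx sy d x k hk sr).mp ⟨iv, hf, hmem⟩
    simp only [decide_eq_true_eq] at hfree
    omega
  · intro h sr hsr
    simp only [decide_eq_true_eq]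
    by_contra hle
    rw [not_lt] at hle
    obtain ⟨iv, hf, hmem⟩ := (pv_iv_bridge sx sy d x k hk sr).mpr hle
    exact h iv (List.mem_filterMap.mpr ⟨sr, hsr, hf⟩) hmem

-- domain bridge: range + generator guard + in-box = the seg_domain window
theorem pv_dom_bridge (sx sy d mn mx x : Int) (k : Int) (hk : k = 0 ∨ k = 1 ∨ k = 2 ∨ k = 3) :
    (0 ≤ x ∧ x ≤ d ∧ (k = 0 ∨ k = 1 ∨ (¬ d - x = 0 ∧ ¬ x = 0)) ∧
      mn ≤ (pvSegPoint sx sy d k x).1 ∧ (pvSegPoint sx sy d k x).1 ≤ mx ∧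
      mn ≤ (pvSegPoint sx sy d k x).2 ∧ (pvSegPoint sx sy d k x).2 ≤ mx) ↔
    ((pvSegDom sx sy d mn mx k).1 ≤ x ∧ x ≤ (pvSegDom sx sy d mn mx k).2) := by
  rcases hk with rfl | rfl | rfl | rfl <;> simp only [pvSegPoint, pvSegDom] <;> norm_num <;> omega

theorem pv_sweep_ge (ivs : List (Int × Int)) : ∀ x, x ≤ pvSweep x ivs := by
  induction ivs with
  | nil => intro x; simp [pvSweep]
  | cons iv t ih =>
    intro x
    simp only [pvSweep]
    split_ifs with h1 h2
    · exact le_refl x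
    · have := ih (iv.2 + 1); omega
    · exact ih x

theorem pv_sweep_not_covered (ivs : List (Int × Int))
    (hpair : ivs.Pairwise (fun a b => a.1 ≤ b.1)) :
    ∀ x, ∀ iv ∈ ivs, ¬ (iv.1 ≤ pvSweep x ivs ∧ pvSweep x ivs ≤ iv.2) := by
  induction hpair with
  | nil => intro x iv h; cases h
  | @cons iv t hhead htail ih =>
    intro x iv' hmem
    simp only [pvSweep]
    split_ifs with h1 h2
    · rcases List.mem_cons.mp hmem with rfl | hm
      · intro hc; omega
      · have := hhead iv' hm; intro hc; omega
    · rcases List.mem_cons.mp hmem with rfl | hm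
      · have := pv_sweep_ge t (iv'.2 + 1); intro hc; omega
      · exact ih (iv.2 + 1) iv' hm
    · rcases List.mem_cons.mp hmem with rfl | hm
      · have := pv_sweep_ge t x; intro hc; omega
      · exact ih x iv' hm

theorem pv_sweep_covered_below (ivs : List (Int × Int)) :
    ∀ x y, x ≤ y → y < pvSweep x ivs → ∃ iv ∈ ivs, iv.1 ≤ y ∧ y ≤ iv.2 := by
  induction ivs with
  | nil => intro x y h1 h2; simp only [pvSweep] at h2; omega
  | cons iv t ih =>
    intro x y hxy hy
    simp only [pvSweep] at hy
    split_ifs at hy with h1 h2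
    · omega
    · by_cases hc : iv.1 ≤ y ∧ y ≤ iv.2
      · exact ⟨iv, List.mem_cons_self, hc⟩
      · have hstep : iv.2 + 1 ≤ y := by omega
        obtain ⟨iv', hm, h⟩ := ih (iv.2 + 1) y hstep hy
        exact ⟨iv', List.mem_cons_of_mem _ hm, h⟩
    · obtain ⟨iv', hm, h⟩ := ih x y hxy hy
      exact ⟨iv', List.mem_cons_of_mem _ hm, h⟩

-- characterisation of seg_min: some m = the least admissible uncovered offset
theorem pv_segmin_some (info : List ((Int × Int) × Int)) (sx sy d mn mx k : Int)
    (hk : k = 0 ∨ k = 1 ∨ k = 2 ∨ k = 3) (m : Int)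
    (h : pvSegMin info sx sy d mn mx k = some m) :
    pvOk info sx sy d mn mx k m ∧ ∀ y, y < m → ¬ pvOk info sx sy d mn mx k y := by
  simp only [pvSegMin] at h
  split_ifs at h with hLg hm
  cases h
  set ivs := PySem.List.sorted (info.filterMap (pvSegIv sx sy d k)) (fun iv => iv.1) false with hivs
  have hpair : ivs.Pairwise (fun a b => a.1 ≤ b.1) := PySem.List.sorted_pairwise _ _
  constructor
  · refine ⟨pv_sweep_ge ivs _, hm, ?_⟩
    rw [pv_free_bridge info sx sy d _ k hk]
    intro iv hiv
    exact pv_sweep_not_covered ivs hpair _ iv (by rw [hivs]; exact (PySem.List.mem_sorted _ _ _ _).mpr hiv)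
  · intro y hy hok
    obtain ⟨hL, hH, hfree⟩ := hok
    obtain ⟨iv, hmem, hcov⟩ := pv_sweep_covered_below ivs _ y hL hy
    have hfree' := (pv_free_bridge info sx sy d y k hk).mp hfree
    exact hfree' iv ((PySem.List.mem_sorted _ _ _ _).mp hmem) hcov

theorem pv_segmin_none (info : List ((Int × Int) × Int)) (sx sy d mn mx k : Int)
    (hk : k = 0 ∨ k = 1 ∨ k = 2 ∨ k = 3)
    (h : pvSegMin info sx sy d mn mx k = none) :
    ∀ y, ¬ pvOk info sx sy d mn mx k y := by
  simp only [pvSegMin] at h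
  split_ifs at h with hLg hm
  · rintro y ⟨hL, hH, -⟩; omega
  · rintro y ⟨hL, hH, hfree⟩
    set ivs := PySem.List.sorted (info.filterMap (pvSegIv sx sy d k)) (fun iv => iv.1) false with hivs
    have hyl : y < pvSweep (pvSegDom sx sy d mn mx k).1 ivs := by omega
    obtain ⟨iv, hmem, hcov⟩ := pv_sweep_covered_below ivs _ y hL hyl
    have hfree' := (pv_free_bridge info sx sy d y k hk).mp hfree
    exact hfree' iv ((PySem.List.mem_sorted _ _ _ _).mp hmem) hcov

-- any admissible offset bounds seg_min from above
theorem pv_ok_segmin_le (info : List ((Int × Int) × Int)) (sx sy d mn mx k x : Int)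
    (hk : k = 0 ∨ k = 1 ∨ k = 2 ∨ k = 3) (hok : pvOk info sx sy d mn mx k x) :
    ∃ m, pvSegMin info sx sy d mn mx k = some m ∧ m ≤ x := by
  rcases hs : pvSegMin info sx sy d mn mx k with _ | m
  · exact absurd hok (pv_segmin_none info sx sy d mn mx k hk hs x)
  · refine ⟨m, rfl, ?_⟩
    by_contra hgt
    exact (pv_segmin_some info sx sy d mn mx k hk m hs).2 x (by omega) hok

-- single step of the best-fold
theorem pv_step_some (info : List ((Int × Int) × Int)) (sx sy d mn mx : Int)
    (acc : Option (Int × Int)) (k : Int) (b : Int × Int)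
    (h : pvSegStep info sx sy d mn mx acc k = some b) :
    (pvSegMin info sx sy d mn mx k = some b.1 ∧ b.2 = k ∧ ∀ bp, acc = some bp → b.1 < bp.1) ∨
    (acc = some b ∧ ∀ m, pvSegMin info sx sy d mn mx k = some m → b.1 ≤ m) := by
  rcases hF : pvSegMin info sx sy d mn mx k with _ | m <;> rcases acc with _ | bp <;>
    simp only [pvSegStep, hF] at h
  · cases h
  · right
    refine ⟨h, ?_⟩
    intro m hm
    cases hm
  · cases h
    exact Or.inl ⟨rfl, rfl, by intro bp hbp; cases hbp⟩
  · split_ifs at h with hlt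
    · cases h
      refine Or.inl ⟨rfl, rfl, ?_⟩
      intro bp' hbp
      cases hbp
      exact hlt
    · cases h
      refine Or.inr ⟨rfl, ?_⟩
      intro m' hm
      cases hm
      omega

theorem pv_step_weak1 (info : List ((Int × Int) × Int)) (sx sy d mn mx : Int)
    (acc : Option (Int × Int)) (k m : Int)
    (hF : pvSegMin info sx sy d mn mx k = some m) :
    ∃ bp, pvSegStep info sx sy d mn mx acc k = some bp ∧ bp.1 ≤ m := by
  rcases acc with _ | b
  · exact ⟨(m, k), by simp only [pvSegStep, hF], le_refl m⟩
  · by_cases hlt : m < b.1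
    · exact ⟨(m, k), by simp only [pvSegStep, hF]; rw [if_pos hlt], le_refl m⟩
    · exact ⟨b, by simp only [pvSegStep, hF]; rw [if_neg hlt], by omega⟩

theorem pv_step_weak2 (info : List ((Int × Int) × Int)) (sx sy d mn mx : Int)
    (acc : Option (Int × Int)) (k : Int) (b : Int × Int) (hacc : acc = some b) :
    ∃ bp, pvSegStep info sx sy d mn mx acc k = some bp ∧ bp.1 ≤ b.1 := by
  subst hacc
  rcases hF : pvSegMin info sx sy d mn mx k with _ | m
  · exact ⟨b, by simp only [pvSegStep, hF], le_refl _⟩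
  · by_cases hlt : m < b.1
    · exact ⟨(m, k), by simp only [pvSegStep, hF]; rw [if_pos hlt], by dsimp; omega⟩
    · exact ⟨b, by simp only [pvSegStep, hF]; rw [if_neg hlt], le_refl _⟩

theorem pv_fold_none (info : List ((Int × Int) × Int)) (sx sy d mn mx : Int)
    (h : (PySem.List.pyRange 0 4 1).foldl (pvSegStep info sx sy d mn mx) none = none) :
    ∀ k, k = 0 ∨ k = 1 ∨ k = 2 ∨ k = 3 → pvSegMin info sx sy d mn mx k = none := by
  have e : PySem.List.pyRange 0 4 1 = [0, 1, 2, 3] := by decide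
  rw [e] at h
  simp only [List.foldl_cons, List.foldl_nil] at h
  rcases hF0 : pvSegMin info sx sy d mn mx 0 with _ | m0 <;>
  rcases hF1 : pvSegMin info sx sy d mn mx 1 with _ | m1 <;>
  rcases hF2 : pvSegMin info sx sy d mn mx 2 with _ | m2 <;>
  rcases hF3 : pvSegMin info sx sy d mn mx 3 with _ | m3 <;>
    simp only [pvSegStep, hF0, hF1, hF2, hF3] at h <;>
    (repeat' split at h) <;> simp_all

theorem pv_fold_some (info : List ((Int × Int) × Int)) (sx sy d mn mx : Int) (b : Int × Int)
    (h : (PySem.List.pyRange 0 4 1).foldl (pvSegStep info sx sy d mn mx) none = some b) :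
    (b.2 = 0 ∨ b.2 = 1 ∨ b.2 = 2 ∨ b.2 = 3) ∧
    pvSegMin info sx sy d mn mx b.2 = some b.1 ∧
    (∀ j m', (j = 0 ∨ j = 1 ∨ j = 2 ∨ j = 3) → pvSegMin info sx sy d mn mx j = some m' → b.1 ≤ m') ∧
    (∀ j m', (j = 0 ∨ j = 1 ∨ j = 2 ∨ j = 3) → j < b.2 → pvSegMin info sx sy d mn mx j = some m' → b.1 < m') := by
  have e : PySem.List.pyRange 0 4 1 = [0, 1, 2, 3] := by decide
  rw [e] at h
  simp only [List.foldl_cons, List.foldl_nil] at h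
  have w1 : ∀ m, pvSegMin info sx sy d mn mx 0 = some m →
      ∃ bp, pvSegStep info sx sy d mn mx none 0 = some bp ∧ bp.1 ≤ m :=
    fun m hm => pv_step_weak1 info sx sy d mn mx none 0 m hm
  have w2 : ∀ j m, (j = 0 ∨ j = 1) → pvSegMin info sx sy d mn mx j = some m →
      ∃ bp, pvSegStep info sx sy d mn mx (pvSegStep info sx sy d mn mx none 0) 1 = some bp ∧ bp.1 ≤ m := by
    rintro j m (rfl | rfl) hm
    · obtain ⟨bp, hbp, hle⟩ := w1 m hm
      obtain ⟨bp', hbp', hle'⟩ := pv_step_weak2 info sx sy d mn mx _ 1 bp hbp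
      exact ⟨bp', hbp', by omega⟩
    · exact pv_step_weak1 info sx sy d mn mx _ 1 m hm
  have w3 : ∀ j m, (j = 0 ∨ j = 1 ∨ j = 2) → pvSegMin info sx sy d mn mx j = some m →
      ∃ bp, pvSegStep info sx sy d mn mx
        (pvSegStep info sx sy d mn mx (pvSegStep info sx sy d mn mx none 0) 1) 2 = some bp ∧ bp.1 ≤ m := by
    rintro j m (rfl | rfl | rfl) hm
    · obtain ⟨bp, hbp, hle⟩ := w2 0 m (Or.inl rfl) hm
      obtain ⟨bp', hbp', hle'⟩ := pv_step_weak2 info sx sy d mn mx _ 2 bp hbp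
      exact ⟨bp', hbp', by omega⟩
    · obtain ⟨bp, hbp, hle⟩ := w2 1 m (Or.inr rfl) hm
      obtain ⟨bp', hbp', hle'⟩ := pv_step_weak2 info sx sy d mn mx _ 2 bp hbp
      exact ⟨bp', hbp', by omega⟩
    · exact pv_step_weak1 info sx sy d mn mx _ 2 m hm
  rcases pv_step_some info sx sy d mn mx _ 3 b h with ⟨hf, hk, hstr⟩ | ⟨heq3, hle3⟩
  · have hstr' : ∀ j m, (j = 0 ∨ j = 1 ∨ j = 2) → pvSegMin info sx sy d mn mx j = some m → b.1 < m := by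
      intro j m hj hm
      obtain ⟨bp, hbp, hle⟩ := w3 j m hj hm
      have := hstr bp hbp
      omega
    refine ⟨by omega, by rw [hk]; exact hf, ?_, ?_⟩
    · rintro j m' (rfl | rfl | rfl | rfl) hj
      · exact le_of_lt (hstr' 0 m' (by norm_num) hj)
      · exact le_of_lt (hstr' 1 m' (by norm_num) hj)
      · exact le_of_lt (hstr' 2 m' (by norm_num) hj)
      · rw [hf] at hj; cases hj; omega
    · rintro j m' (rfl | rfl | rfl | rfl) hlt hj
      · exact hstr' 0 m' (by norm_num) hj
      · exact hstr' 1 m' (by norm_num) hj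
      · exact hstr' 2 m' (by norm_num) hj
      · rw [hk] at hlt; omega
  · rcases pv_step_some info sx sy d mn mx _ 2 b heq3 with ⟨hf, hk, hstr⟩ | ⟨heq2, hle2⟩
    · have hstr' : ∀ j m, (j = 0 ∨ j = 1) → pvSegMin info sx sy d mn mx j = some m → b.1 < m := by
        intro j m hj hm
        obtain ⟨bp, hbp, hle⟩ := w2 j m hj hm
        have := hstr bp hbp
        omega
      refine ⟨by omega, by rw [hk]; exact hf, ?_, ?_⟩
      · rintro j m' (rfl | rfl | rfl | rfl) hj
        · exact le_of_lt (hstr' 0 m' (by norm_num) hj)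
        · exact le_of_lt (hstr' 1 m' (by norm_num) hj)
        · rw [hf] at hj; cases hj; omega
        · exact hle3 m' hj
      · rintro j m' (rfl | rfl | rfl | rfl) hlt hj
        · exact hstr' 0 m' (by norm_num) hj
        · exact hstr' 1 m' (by norm_num) hj
        · rw [hk] at hlt; omega
        · rw [hk] at hlt; omega
    · rcases pv_step_some info sx sy d mn mx _ 1 b heq2 with ⟨hf, hk, hstr⟩ | ⟨heq1, hle1⟩
      · have hstr' : ∀ m, pvSegMin info sx sy d mn mx 0 = some m → b.1 < m := by
          intro m hm
          obtain ⟨bp, hbp, hle⟩ := w1 m hm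
          have := hstr bp hbp
          omega
        refine ⟨by omega, by rw [hk]; exact hf, ?_, ?_⟩
        · rintro j m' (rfl | rfl | rfl | rfl) hj
          · exact le_of_lt (hstr' m' hj)
          · rw [hf] at hj; cases hj; omega
          · exact hle2 m' hj
          · exact hle3 m' hj
        · rintro j m' (rfl | rfl | rfl | rfl) hlt hj
          · exact hstr' m' hj
          · rw [hk] at hlt; omega
          · rw [hk] at hlt; omega
          · rw [hk] at hlt; omega
      · rcases pv_step_some info sx sy d mn mx _ 0 b heq1 with ⟨hf, hk, hstr⟩ | ⟨heq0, hle0⟩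
        · refine ⟨by omega, by rw [hk]; exact hf, ?_, ?_⟩
          · rintro j m' (rfl | rfl | rfl | rfl) hj
            · rw [hf] at hj; cases hj; omega
            · exact hle1 m' hj
            · exact hle2 m' hj
            · exact hle3 m' hj
          · rintro j m' (rfl | rfl | rfl | rfl) hlt hj
            · rw [hk] at hlt; omega
            · rw [hk] at hlt; omega
            · rw [hk] at hlt; omega
            · rw [hk] at hlt; omega
        · cases heq0

-- evaluated at one x: A's candidate list yields none when no segment admits x …
theorem pv_cands_none (info : List ((Int × Int) × Int)) (sx sy d mn mx x : Int)
    (hx0 : 0 ≤ x) (hxd : x ≤ d)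
    (hno : ∀ k, k = 0 ∨ k = 1 ∨ k = 2 ∨ k = 3 → ¬ pvOk info sx sy d mn mx k x) :
    (([(sx + x, sy + (d - x)), (sx - x, sy - (d - x))] ++
      (if ¬ d - x = 0 ∧ ¬ x = 0 then [(sx - x, sy + (d - x)), (sx + x, sy - (d - x))] else [])).findSome?
      (fun p => if mn ≤ p.1 ∧ p.1 ≤ mx ∧ mn ≤ p.2 ∧ p.2 ≤ mx ∧ pvAltFree info p.1 p.2 = true then some p else none))
      = none := by
  have key : ∀ k, (k = 0 ∨ k = 1 ∨ k = 2 ∨ k = 3) → (k = 0 ∨ k = 1 ∨ (¬ d - x = 0 ∧ ¬ x = 0)) →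
      ¬ (mn ≤ (pvSegPoint sx sy d k x).1 ∧ (pvSegPoint sx sy d k x).1 ≤ mx ∧
         mn ≤ (pvSegPoint sx sy d k x).2 ∧ (pvSegPoint sx sy d k x).2 ≤ mx ∧
         pvAltFree info (pvSegPoint sx sy d k x).1 (pvSegPoint sx sy d k x).2 = true) := by
    intro k hk hguard hcond
    apply hno k hk
    have hdom := (pv_dom_bridge sx sy d mn mx x k hk).mp
      ⟨hx0, hxd, hguard, hcond.1, hcond.2.1, hcond.2.2.1, hcond.2.2.2.1⟩
    exact ⟨hdom.1, hdom.2, hcond.2.2.2.2⟩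
  have e0 : pvSegPoint sx sy d 0 x = (sx + x, sy + (d - x)) := by
    unfold pvSegPoint; rw [if_pos rfl]
  have e1 : pvSegPoint sx sy d 1 x = (sx - x, sy - (d - x)) := by
    unfold pvSegPoint; rw [if_neg (by norm_num), if_pos rfl]
  have e2 : pvSegPoint sx sy d 2 x = (sx - x, sy + (d - x)) := by
    unfold pvSegPoint; rw [if_neg (by norm_num), if_neg (by norm_num), if_pos rfl]
  have e3 : pvSegPoint sx sy d 3 x = (sx + x, sy - (d - x)) := by
    unfold pvSegPoint; rw [if_neg (by norm_num), if_neg (by norm_num), if_neg (by norm_num)]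
  apply List.findSome?_eq_none_iff.mpr
  intro p hp
  rw [List.mem_append] at hp
  apply if_neg
  rcases hp with h | h
  · simp only [List.mem_cons, List.not_mem_nil, or_false] at h
    rcases h with rfl | rfl
    · rw [← e0]; exact key 0 (by norm_num) (by norm_num)
    · rw [← e1]; exact key 1 (by norm_num) (by norm_num)
  · by_cases hg : ¬ d - x = 0 ∧ ¬ x = 0
    · rw [if_pos hg] at h
      simp only [List.mem_cons, List.not_mem_nil, or_false] at h
      rcases h with rfl | rfl
      · rw [← e2]; exact key 2 (by norm_num) (by norm_num [hg.1, hg.2])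
      · rw [← e3]; exact key 3 (by norm_num) (by norm_num [hg.1, hg.2])
    · rw [if_neg hg] at h
      cases h

-- … and the point of the least admitting segment when one does
theorem pv_cands_some (info : List ((Int × Int) × Int)) (sx sy d mn mx x k : Int)
    (hk : k = 0 ∨ k = 1 ∨ k = 2 ∨ k = 3)
    (hok : pvOk info sx sy d mn mx k x)
    (hfst : ∀ j, (j = 0 ∨ j = 1 ∨ j = 2 ∨ j = 3) → j < k → ¬ pvOk info sx sy d mn mx j x) :
    (([(sx + x, sy + (d - x)), (sx - x, sy - (d - x))] ++
      (if ¬ d - x = 0 ∧ ¬ x = 0 then [(sx - x, sy + (d - x)), (sx + x, sy - (d - x))] else [])).findSome?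
      (fun p => if mn ≤ p.1 ∧ p.1 ≤ mx ∧ mn ≤ p.2 ∧ p.2 ≤ mx ∧ pvAltFree info p.1 p.2 = true then some p else none))
      = some (pvSegPoint sx sy d k x) := by
  have e0 : pvSegPoint sx sy d 0 x = (sx + x, sy + (d - x)) := by
    unfold pvSegPoint; rw [if_pos rfl]
  have e1 : pvSegPoint sx sy d 1 x = (sx - x, sy - (d - x)) := by
    unfold pvSegPoint; rw [if_neg (by norm_num), if_pos rfl]
  have e2 : pvSegPoint sx sy d 2 x = (sx - x, sy + (d - x)) := by
    unfold pvSegPoint; rw [if_neg (by norm_num), if_neg (by norm_num), if_pos rfl]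
  have e3 : pvSegPoint sx sy d 3 x = (sx + x, sy - (d - x)) := by
    unfold pvSegPoint; rw [if_neg (by norm_num), if_neg (by norm_num), if_neg (by norm_num)]
  -- the admitted segment satisfies the full candidate condition
  have hrev := (pv_dom_bridge sx sy d mn mx x k hk).mpr ⟨hok.1, hok.2.1⟩
  have hcond : mn ≤ (pvSegPoint sx sy d k x).1 ∧ (pvSegPoint sx sy d k x).1 ≤ mx ∧
      mn ≤ (pvSegPoint sx sy d k x).2 ∧ (pvSegPoint sx sy d k x).2 ≤ mx ∧
      pvAltFree info (pvSegPoint sx sy d k x).1 (pvSegPoint sx sy d k x).2 = true :=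
    ⟨hrev.2.2.2.1, hrev.2.2.2.2.1, hrev.2.2.2.2.2.1, hrev.2.2.2.2.2.2, hok.2.2⟩
  -- a rejected segment fails the candidate condition
  have keyno : ∀ j, (j = 0 ∨ j = 1 ∨ j = 2 ∨ j = 3) → (j = 0 ∨ j = 1 ∨ (¬ d - x = 0 ∧ ¬ x = 0)) → j < k →
      ¬ (mn ≤ (pvSegPoint sx sy d j x).1 ∧ (pvSegPoint sx sy d j x).1 ≤ mx ∧
         mn ≤ (pvSegPoint sx sy d j x).2 ∧ (pvSegPoint sx sy d j x).2 ≤ mx ∧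
         pvAltFree info (pvSegPoint sx sy d j x).1 (pvSegPoint sx sy d j x).2 = true) := by
    intro j hj hguard hlt hcondj
    apply hfst j hj hlt
    have hdom := (pv_dom_bridge sx sy d mn mx x j hj).mp
      ⟨hrev.1, hrev.2.1, hguard, hcondj.1, hcondj.2.1, hcondj.2.2.1, hcondj.2.2.2.1⟩
    exact ⟨hdom.1, hdom.2, hcondj.2.2.2.2⟩
  rcases hk with rfl | rfl | rfl | rfl
  · rw [List.findSome?_append, List.findSome?_cons]
    rw [← e0, if_pos hcond]
    rfl
  · rw [List.findSome?_append, List.findSome?_cons]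
    rw [← e0, if_neg (keyno 0 (by norm_num) (by norm_num) (by norm_num)), List.findSome?_cons]
    rw [← e1, if_pos hcond]
    rfl
  · have hg : ¬ d - x = 0 ∧ ¬ x = 0 := by
      rcases hrev.2.2.1 with h | h | h
      · exact absurd h (by norm_num)
      · exact absurd h (by norm_num)
      · exact h
    rw [List.findSome?_append, List.findSome?_cons]
    rw [← e0, if_neg (keyno 0 (by norm_num) (by norm_num) (by norm_num)), List.findSome?_cons]
    rw [← e1, if_neg (keyno 1 (by norm_num) (by norm_num) (by norm_num)), List.findSome?_nil]
    rw [if_pos hg, List.findSome?_cons]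
    rw [← e2, if_pos hcond]
    rfl
  · have hg : ¬ d - x = 0 ∧ ¬ x = 0 := by
      rcases hrev.2.2.1 with h | h | h
      · exact absurd h (by norm_num)
      · exact absurd h (by norm_num)
      · exact h
    rw [List.findSome?_append, List.findSome?_cons]
    rw [← e0, if_neg (keyno 0 (by norm_num) (by norm_num) (by norm_num)), List.findSome?_cons]
    rw [← e1, if_neg (keyno 1 (by norm_num) (by norm_num) (by norm_num)), List.findSome?_nil]
    rw [if_pos hg, List.findSome?_cons]
    rw [← e2, if_neg (keyno 2 (by norm_num) (by norm_num [hg.1, hg.2]) (by norm_num)), List.findSome?_cons]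
    rw [← e3, if_pos hcond]
    rfl

-- first-some evaluation of the range scan
theorem pv_range_first {γ : Type} (F : Int → Option γ) (d xs : Int) (v : γ)
    (h0 : 0 ≤ xs) (hd : xs ≤ d)
    (hnone : ∀ x, 0 ≤ x → x < xs → F x = none) (hsome : F xs = some v) :
    (PySem.List.pyRange 0 (d + 1) 1).findSome? F = some v := by
  rw [PySem.List.pyRange_one_append 0 xs (d + 1) h0 (by omega), List.findSome?_append]
  have hleft : (PySem.List.pyRange 0 xs 1).findSome? F = none := by
    apply List.findSome?_eq_none_iff.mpr
    intro x hx
    rw [PySem.List.mem_pyRange_one] at hx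
    exact hnone x hx.1 hx.2
  rw [hleft, Option.none_or]
  rw [PySem.List.pyRange_one_cons (by omega), List.findSome?_cons, hsome]

-- the per-sensor scan of A equals B's interval scan
theorem pv_scan_eq (s b : List (Int × Int)) (mn mx sx sy r : Int)
    (hlen : s.length ≤ b.length) :
    (pvGenPoints (sx, sy) (r + 1)).findSome? (fun p =>
        if mn ≤ p.1 ∧ p.1 ≤ mx ∧ mn ≤ p.2 ∧ p.2 ≤ mx ∧ pvUndetectable p s b then some p
        else none) = pvSensorScan (pvInfo s b) mn mx ((sx, sy), r) := by
  have hfun : (fun p : Int × Int =>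
      if mn ≤ p.1 ∧ p.1 ≤ mx ∧ mn ≤ p.2 ∧ p.2 ≤ mx ∧ pvUndetectable p s b then some p else none)
      = (fun p : Int × Int =>
      if mn ≤ p.1 ∧ p.1 ≤ mx ∧ mn ≤ p.2 ∧ p.2 ≤ mx ∧ pvAltFree (pvInfo s b) p.1 p.2 = true then some p else none) := by
    funext p
    rw [pv_und_eq_free p s b hlen]
  rw [hfun]
  unfold pvGenPoints pvSensorScan
  dsimp only
  rw [pv_findSome?_flatMap]
  rcases hFo : (PySem.List.pyRange 0 4 1).foldl (pvSegStep (pvInfo s b) sx sy (r + 1) mn mx) none with _ | bb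
  · -- B finds nothing: every x of the range yields no candidate
    have hall := pv_fold_none (pvInfo s b) sx sy (r + 1) mn mx hFo
    apply List.findSome?_eq_none_iff.mpr
    intro x hx
    rw [PySem.List.mem_pyRange_one] at hx
    exact pv_cands_none (pvInfo s b) sx sy (r + 1) mn mx x hx.1 (by omega)
      (fun k hk => pv_segmin_none (pvInfo s b) sx sy (r + 1) mn mx k hk (hall k hk) x)
  · -- B finds (offset, segment) bb
    obtain ⟨hk4, hmin, hwk, hstr⟩ := pv_fold_some (pvInfo s b) sx sy (r + 1) mn mx bb hFo
    obtain ⟨hok, hleast⟩ := pv_segmin_some (pvInfo s b) sx sy (r + 1) mn mx bb.2 hk4 bb.1 hmin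
    have hrev := (pv_dom_bridge sx sy (r + 1) mn mx bb.1 bb.2 hk4).mpr ⟨hok.1, hok.2.1⟩
    apply pv_range_first _ (r + 1) bb.1 _ hrev.1 hrev.2.1
    · -- below bb.1 no segment admits any candidate
      intro x hx0 hxlt
      apply pv_cands_none (pvInfo s b) sx sy (r + 1) mn mx x hx0 (by omega)
      intro k hk hokx
      obtain ⟨m', hm', hle'⟩ := pv_ok_segmin_le (pvInfo s b) sx sy (r + 1) mn mx k x hk hokx
      have := hwk k m' hk hm'
      omega
    · -- at bb.1 the least admitting segment is bb.2
      apply pv_cands_some (pvInfo s b) sx sy (r + 1) mn mx bb.1 bb.2 hk4 hok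
      intro j hj hjlt hokj
      obtain ⟨m', hm', hle'⟩ := pv_ok_segmin_le (pvInfo s b) sx sy (r + 1) mn mx j bb.1 hj hokj
      have := hstr j m' hj hjlt hm'
      omega

-- the outer loops agree
theorem pv_outer_go (s b : List (Int × Int)) (mn mx : Int) (hlen : s.length ≤ b.length) :
    ∀ (m : Nat) (a : Int), 0 ≤ a → ((s.length : Int) - a).toNat = m →
      pvFdbGo s b mn mx (PySem.List.pyRange a (s.length : Int) 1) =
        ((pvInfo s b).drop a.toNat).findSome? (pvSensorScan (pvInfo s b) mn mx) := by
  intro m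
  induction m with
  | zero =>
    intro a ha h0
    rw [PySem.List.pyRange_one_eq_nil (by omega)]
    have hnil : (pvInfo s b).drop a.toNat = [] := by
      apply List.drop_eq_nil_of_le
      simp only [pvInfo, List.length_map, List.length_zip]
      omega
    simp [pvFdbGo, hnil]
  | succ m ih =>
    intro a ha h0
    have hlt : a < (s.length : Int) := by omega
    have hk : a.toNat < s.length := by omega
    have hkb : a.toNat < b.length := by omega
    have hil : a.toNat < (pvInfo s b).length := by
      simp only [pvInfo, List.length_map, List.length_zip]
      omega
    rw [PySem.List.pyRange_one_cons hlt]
    have hs : PySem.List.pyGet? s a = some s[a.toNat] :=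
      PySem.List.pyGet?_eq_some_getElem s ha (by exact_mod_cast hlt)
    have hbg : PySem.List.pyGet? b a = some b[a.toNat] :=
      PySem.List.pyGet?_eq_some_getElem b ha (by omega)
    have hget : (pvInfo s b)[a.toNat]? = some (s[a.toNat], pvManhattan s[a.toNat] b[a.toNat]) := by
      have hz : (s.zip b)[a.toNat]? = some (s[a.toNat], b[a.toNat]) := by
        rw [List.getElem?_zip_eq_some]
        exact ⟨List.getElem?_eq_getElem hk, List.getElem?_eq_getElem hkb⟩
      simp only [pvInfo, List.getElem?_map, hz, Option.map_some]
      rfl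
    have hdrop : (pvInfo s b).drop a.toNat =
        (s[a.toNat], pvManhattan s[a.toNat] b[a.toNat]) :: (pvInfo s b).drop (a.toNat + 1) := by
      rw [List.drop_eq_getElem_cons hil]
      congr 1
      rw [← Option.some_inj, ← List.getElem?_eq_getElem hil]
      exact hget
    have hscan := pv_scan_eq s b mn mx (s[a.toNat]).1 (s[a.toNat]).2
      (pvManhattan s[a.toNat] b[a.toNat]) hlen
    simp only [Prod.mk.eta] at hscan
    have hstep := ih (a + 1) (by omega) (by omega)
    have htn : (a + 1).toNat = a.toNat + 1 := by omega
    rw [htn] at hstep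
    rw [hdrop, List.findSome?_cons]
    simp only [pvFdbGo, hs, hbg, Option.getD_some]
    rw [hscan]
    cases pvSensorScan (pvInfo s b) mn mx (s[a.toNat], pvManhattan s[a.toNat] b[a.toNat]) with
    | some v => simp
    | none => simp [hstep]

-- ===== VERDICT (by name: the statement is the Claim_ definition above) =====
theorem find_distress_beacon_spec : Claim_equal_find_distress_beacon := by
  intro s b mn mx _ hpre
  unfold Spec_find_distress_beacon find_distress_beacon find_distress_beacon_alt
  have h := pv_outer_go s b mn mx hpre ((s.length : Int) - 0).toNat 0 le_rfl rfl
  simpa using h
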